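-- pv_equiv track=rewrite | github.com/bachnguyen0175/L-CoGNN | code/tests/analyze_model_architecture.py | get_component_name
-- ===== SOURCE A (Python) =====
-- def get_component_name(param_name):
--     """Extract component name from parameter name"""
--     parts = param_name.split('.')
--
--     # Handle nested components
--     if len(parts) >= 2:
--         if 'augmentation_pipeline' in param_name:
--             if 'autoencoder' in param_name:
--                 # Extract autoencoder type and layer
--                 autoencoder_idx = None
--                 layer_info = ""
--                 for i, part in enumerate(parts):
--                     if part.isdigit():
--                         autoencoder_idx = part
--                     elif 'encoder' in part or 'decoder' in part:
--                         layer_info = part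
--
--                 if autoencoder_idx is not None:
--                     return f"augmentation.autoencoder_{autoencoder_idx}.{layer_info}"
--                 else:
--                     return "augmentation.autoencoder"
--             else:
--                 return f"augmentation.{parts[2] if len(parts) > 2 else 'other'}"
--
--         elif 'cross_aug_learning' in param_name:
--             return f"cross_aug_learning.{parts[2] if len(parts) > 2 else 'unknown'}"
--
--         elif any(x in param_name for x in ['fc_list', 'feat_drop']):
--             return "core.feature_projection"
--
--         elif any(x in param_name for x in ['mp_encoder', 'mp']):
--             return "core.mp_encoder"
--
--         elif any(x in param_name for x in ['sc_encoder', 'sc']):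
--             return "core.sc_encoder"
--
--         elif 'contrast' in param_name:
--             return "core.contrast"
--
--         elif any(x in param_name for x in ['att', 'attention']):
--             return "core.attention"
--
--         elif 'expert' in param_name:
--             return "expert_components"
--
--         else:
--             return f"other.{parts[0]}"
--
--     return "unknown"
-- ===== SOURCE B (Python) =====
-- # Part-wise classifier: since no keyword contains '.', a keyword occurs in
-- # param_name iff it occurs in some single dot-separated part; so every check
-- # runs over the parts, and the keyword cascade becomes one pass over the parts
-- # computing the minimum rule rank.
--
-- PRIORITY = ['fc_list', 'feat_drop', 'mp_encoder', 'mp', 'sc_encoder', 'sc',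
--             'contrast', 'att', 'attention', 'expert']
-- LABELS = ['core.feature_projection', 'core.feature_projection',
--           'core.mp_encoder', 'core.mp_encoder',
--           'core.sc_encoder', 'core.sc_encoder',
--           'core.contrast', 'core.attention', 'core.attention',
--           'expert_components']
--
--
-- def _rank(part):
--     """Index of the highest-priority keyword occurring in this part (10 = none)."""
--     for i, k in enumerate(PRIORITY):
--         if k in part:
--             return i
--     return len(PRIORITY)
--
--
-- def get_component_name(param_name):
--     """Extract component name from parameter name"""
--     parts = param_name.split('.')
--     if len(parts) < 2:
--         return "unknown"
--
--     if any('augmentation_pipeline' in p for p in parts):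
--         if any('autoencoder' in p for p in parts):
--             # last digit part / last encoder-or-decoder part win
--             idx = next((p for p in reversed(parts) if p.isdigit()), None)
--             if idx is None:
--                 return "augmentation.autoencoder"
--             layer = next((p for p in reversed(parts)
--                           if 'encoder' in p or 'decoder' in p), "")
--             return f"augmentation.autoencoder_{idx}.{layer}"
--         return "augmentation." + (parts[2] if len(parts) > 2 else 'other')
--
--     if any('cross_aug_learning' in p for p in parts):
--         return "cross_aug_learning." + (parts[2] if len(parts) > 2 else 'unknown')
--
--     best = len(PRIORITY)
--     for p in parts:
--         r = _rank(p)
--         if r < best: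
--             best = r
--     if best < len(PRIORITY):
--         return LABELS[best]
--     return "other." + parts[0]
-- ===== Notes on version B (the rewrite author's own statement) =====
-- stated objective: alternative
-- what changed: B splits the name once and classifies part-by-part (correct because no keyword contains '.'): the whole-string elif cascade of keyword scans becomes a single pass over the dot-separated parts computing the minimum rule rank per part, the special prefixes become any()-over-parts tests, and the autoencoder last-match loop becomes first-match scans of the reversed parts.
import Mathlib
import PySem

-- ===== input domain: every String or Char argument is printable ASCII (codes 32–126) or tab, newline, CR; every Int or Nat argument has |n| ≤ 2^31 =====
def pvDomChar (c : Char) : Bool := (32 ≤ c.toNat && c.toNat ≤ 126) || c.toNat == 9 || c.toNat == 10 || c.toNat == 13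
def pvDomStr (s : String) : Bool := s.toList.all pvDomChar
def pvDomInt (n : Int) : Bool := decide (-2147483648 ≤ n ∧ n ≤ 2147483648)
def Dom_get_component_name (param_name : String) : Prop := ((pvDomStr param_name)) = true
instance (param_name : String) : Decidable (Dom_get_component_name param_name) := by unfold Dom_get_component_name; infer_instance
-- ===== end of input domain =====

-- B classifies part-by-part: no keyword contains '.', so a keyword occurs in the name
-- iff it occurs in one dot-separated part; the keyword cascade becomes a single pass
-- over the parts computing the minimum rule rank (alternative decomposition, same cost).

-- ===== PORT A =====
def get_component_name (param_name : String) : String :=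
  -- param_name.split('.'); the separator is the non-empty literal ".", so split? is always `some`
  let parts := (PySem.Str.split? param_name ".").getD []
  if 2 ≤ parts.length then
    if PySem.Str.isIn "augmentation_pipeline" param_name then
      if PySem.Str.isIn "autoencoder" param_name then
        -- for i, part in enumerate(parts): last digit part / last encoder-or-decoder part win
        let st := parts.foldl (fun (st : Option String × String) part =>
          if PySem.Str.strIsdigit part then (some part, st.2)
          else if PySem.Str.isIn "encoder" part || PySem.Str.isIn "decoder" part then (st.1, part)
          else st) (none, "")
        match st.1 with
        | some idx => "augmentation.autoencoder_" ++ idx ++ "." ++ st.2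
        | none => "augmentation.autoencoder"
      else
        "augmentation." ++ (if 2 < parts.length then PySem.List.pyGetD parts 2 "" else "other")
    else if PySem.Str.isIn "cross_aug_learning" param_name then
      "cross_aug_learning." ++ (if 2 < parts.length then PySem.List.pyGetD parts 2 "" else "unknown")
    else if PySem.Str.isIn "fc_list" param_name || PySem.Str.isIn "feat_drop" param_name then
      "core.feature_projection"
    else if PySem.Str.isIn "mp_encoder" param_name || PySem.Str.isIn "mp" param_name then
      "core.mp_encoder"
    else if PySem.Str.isIn "sc_encoder" param_name || PySem.Str.isIn "sc" param_name then
      "core.sc_encoder"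
    else if PySem.Str.isIn "contrast" param_name then
      "core.contrast"
    else if PySem.Str.isIn "att" param_name || PySem.Str.isIn "attention" param_name then
      "core.attention"
    else if PySem.Str.isIn "expert" param_name then
      "expert_components"
    else
      "other." ++ PySem.List.pyGetD parts 0 ""
  else "unknown"

-- ===== PORT B =====
def pvPriority : List String :=
  ["fc_list", "feat_drop", "mp_encoder", "mp", "sc_encoder", "sc",
   "contrast", "att", "attention", "expert"]

def pvLabels : List String :=
  ["core.feature_projection", "core.feature_projection",
   "core.mp_encoder", "core.mp_encoder",
   "core.sc_encoder", "core.sc_encoder",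
   "core.contrast", "core.attention", "core.attention",
   "expert_components"]

-- _rank: index of the highest-priority keyword occurring in this part (10 = none)
def pvRankGo (part : String) : Nat → List String → Nat
  | i, [] => i
  | i, k :: ks => if PySem.Str.isIn k part then i else pvRankGo part (i + 1) ks

def pvRank (part : String) : Nat := pvRankGo part 0 pvPriority

-- best = len(PRIORITY); for p in parts: r = _rank(p); if r < best: best = r
def pvBest (parts : List String) : Nat :=
  parts.foldl (fun best p => if pvRank p < best then pvRank p else best) pvPriority.length

def get_component_name_alt (param_name : String) : String :=
  let parts := (PySem.Str.split? param_name ".").getD []   -- '.' is non-empty, so always `some`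
  if parts.length < 2 then "unknown"
  else if parts.any (fun p => PySem.Str.isIn "augmentation_pipeline" p) then
    if parts.any (fun p => PySem.Str.isIn "autoencoder" p) then
      match parts.reverse.find? (fun p => PySem.Str.strIsdigit p) with
      | none => "augmentation.autoencoder"
      | some idx =>
          let layer := (parts.reverse.find? (fun p =>
            PySem.Str.isIn "encoder" p || PySem.Str.isIn "decoder" p)).getD ""
          "augmentation.autoencoder_" ++ idx ++ "." ++ layer
    else "augmentation." ++ (if 2 < parts.length then PySem.List.pyGetD parts 2 "" else "other")
  else if parts.any (fun p => PySem.Str.isIn "cross_aug_learning" p) then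
    "cross_aug_learning." ++ (if 2 < parts.length then PySem.List.pyGetD parts 2 "" else "unknown")
  else
    if pvBest parts < pvPriority.length then PySem.List.pyGetD pvLabels (pvBest parts) ""
    else "other." ++ PySem.List.pyGetD parts 0 ""

-- ===== PRECONDITION & SPEC =====
def Spec_get_component_name (param_name : String) (out : String) : Prop := out = get_component_name_alt param_name
instance (param_name : String) (out : String) : Decidable (Spec_get_component_name param_name out) := by unfold Spec_get_component_name; infer_instance

-- ===== CLAIM (what is proved, stated in full; the proofs are below) =====
def Claim_equal_get_component_name : Prop := ∀ (param_name : String), Dom_get_component_name param_name → Spec_get_component_name param_name (get_component_name param_name)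

-- ===== LEMMAS AND PROOFS =====

-- a digit-only string cannot contain a substring holding the letter 'e'
theorem pv_digit_no_e (p sub : String) (hd : PySem.Str.strIsdigit p = true)
    (he : 'e' ∈ sub.toList) : PySem.Str.isIn sub p = false := by
  rw [Bool.eq_false_iff]
  intro h'
  have hinf : sub.toList <:+: p.toList := (PySem.Str.isIn_iff_infix _ _).1 h'
  have hmem : 'e' ∈ p.toList := hinf.subset he
  simp [PySem.Str.strIsdigit, PySem.Chars.strIsdigit, List.all_eq_true] at hd
  exact absurd (hd.2 'e' hmem) (by decide)

-- the first component of A's loop state is the last f-part: fold = find? over the reverse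
theorem pv_fold_fst (f g : String → Bool) (l : List String) (st : Option String × String) :
    (l.foldl (fun (st : Option String × String) part =>
        if f part then (some part, st.2)
        else if g part then (st.1, part)
        else st) st).1
      = (l.reverse.find? f).or st.1 := by
  induction l generalizing st with
  | nil => simp
  | cons p l ih =>
      simp only [List.foldl_cons, List.reverse_cons, List.find?_append, ih]
      cases hf : l.reverse.find? f with
      | some x => simp
      | none =>
          by_cases hfp : f p = true
          · simp [hfp]
          · simp only [List.find?_cons, hfp, Option.none_or, if_false,
              Bool.false_eq_true]
            split <;> rfl

-- the second component is the last g-part, provided f-parts are never g-parts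
theorem pv_fold_snd (f g : String → Bool) (hfg : ∀ p, f p = true → g p = false)
    (l : List String) (st : Option String × String) :
    (l.foldl (fun (st : Option String × String) part =>
        if f part then (some part, st.2)
        else if g part then (st.1, part)
        else st) st).2
      = (l.reverse.find? g).getD st.2 := by
  induction l generalizing st with
  | nil => simp
  | cons p l ih =>
      simp only [List.foldl_cons, List.reverse_cons, List.find?_append, ih]
      cases hf : l.reverse.find? g with
      | some x => simp
      | none =>
          by_cases hfp : f p = true
          · simp [hfp, hfg p hfp]
          · by_cases hgp : g p = true <;> simp [hfp, hgp]

-- PySem's fuel-based single-character split is Mathlib's List.splitOn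
theorem pv_splitOn_go (c : Char) (fuel : Nat) (l cur : List Char) (acc : List (List Char))
    (h : l.length < fuel) :
    PySem.Chars.splitOn.go [c] fuel l cur acc
      = acc.reverse ++ (l.splitOn c).modifyHead (cur.reverse ++ ·) := by
  induction fuel generalizing l cur acc with
  | zero => omega
  | succ n ih =>
      cases l with
      | nil => simp [PySem.Chars.splitOn.go]
      | cons c2 rest =>
          have hne := List.splitOnP_ne_nil (fun x => x == c) rest
          obtain ⟨hd, tl, hsp⟩ := List.exists_cons_of_ne_nil hne
          simp only [PySem.Chars.splitOn.go]
          by_cases hc : c = c2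
          · subst hc
            rw [if_pos (by simp [List.isPrefixOf])]
            have hdrop : List.drop ([c].length) (c :: rest) = rest := by simp
            rw [hdrop]
            rw [ih rest [] (cur.reverse :: acc)
              (by simp only [List.length_cons] at h; omega)]
            simp [List.splitOn, List.splitOnP_cons, hsp]
          · rw [if_neg (by simp [List.isPrefixOf, hc])]
            rw [ih rest (c2 :: cur) acc
              (by simp only [List.length_cons] at h; omega)]
            simp [List.splitOn, List.splitOnP_cons, Ne.symm hc, hsp]

theorem pv_splitOn_single (s : List Char) (c : Char) :
    PySem.Chars.splitOn s [c] = s.splitOn c := by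
  unfold PySem.Chars.splitOn
  rw [pv_splitOn_go c (s.length + 1) s [] [] (by omega)]
  have hne := List.splitOnP_ne_nil (fun x => x == c) s
  obtain ⟨hd, tl, hsp⟩ := List.exists_cons_of_ne_nil hne
  simp [List.splitOn, hsp]

-- an infix avoiding the separator element lies on one side of it
theorem pv_infix_append_cons {α : Type} (k xs ys : List α) (d : α) (hd : d ∉ k)
    (h : k <:+: xs ++ d :: ys) : k <:+: xs ∨ k <:+: ys := by
  obtain ⟨a, b, hab⟩ := h
  by_cases h1 : a.length + k.length ≤ xs.length
  · left
    have e := congrArg (List.take xs.length) hab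
    rw [List.take_left] at e
    rw [List.take_append, List.take_append] at e
    rw [List.take_of_length_le (show a.length ≤ xs.length by omega)] at e
    rw [List.take_of_length_le (show k.length ≤ xs.length - a.length by omega)] at e
    exact ⟨a, _, e⟩
  · by_cases h2 : xs.length + 1 ≤ a.length
    · right
      have e := congrArg (List.drop (xs.length + 1)) hab
      have e1 : (xs ++ d :: ys).drop (xs.length + 1) = ys := by
        rw [List.drop_append]
        rw [List.drop_eq_nil_of_le (by omega)]
        rw [show xs.length + 1 - xs.length = 1 by omega]
        simp
      rw [e1] at e
      rw [List.drop_append, List.drop_append] at e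
      rw [show xs.length + 1 - a.length = 0 by omega] at e
      rw [show xs.length + 1 - (a ++ k).length = 0 by
        simp only [List.length_append]; omega] at e
      simp only [List.drop_zero] at e
      exact ⟨a.drop (xs.length + 1), b, e⟩
    · exfalso
      apply hd
      have hlt : xs.length < (xs ++ d :: ys).length := by simp
      have hlt2 : xs.length < ((a ++ k) ++ b).length := by rw [hab]; exact hlt
      have hka : xs.length - a.length < k.length := by omega
      have h1' : (xs ++ d :: ys)[xs.length]'hlt = d := by
        rw [List.getElem_append_right (le_refl _)]
        simp
      have h2' : ((a ++ k) ++ b)[xs.length]'hlt2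
          = k[xs.length - a.length]'hka := by
        rw [List.getElem_append_left (by simp only [List.length_append]; omega)]
        rw [List.getElem_append_right (by omega)]
      have h3 : ((a ++ k) ++ b)[xs.length]'hlt2 = (xs ++ d :: ys)[xs.length]'hlt :=
        List.getElem_of_eq hab hlt2
      rw [h2', h1'] at h3
      exact h3 ▸ List.getElem_mem hka

-- k avoids the separator: k occurs in the rebuilt string iff it occurs in one chunk
theorem pv_infix_intercalate (k : List Char) (c : Char) (hc : c ∉ k) :
    ∀ (parts : List (List Char)), parts ≠ [] →
      ((k <:+: [c].intercalate parts) ↔ ∃ p ∈ parts, k <:+: p)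
  | [], h => absurd rfl h
  | [p], _ => by simp [List.intercalate]
  | p :: q :: t, _ => by
      have ih := pv_infix_intercalate k c hc (q :: t) (by simp)
      have hstep : [c].intercalate (p :: q :: t) = p ++ c :: [c].intercalate (q :: t) := by
        simp [List.intercalate, List.intersperse_cons₂]
      rw [hstep]
      constructor
      · intro h
        rcases pv_infix_append_cons k p ([c].intercalate (q :: t)) c hc h with h | h
        · exact ⟨p, by simp, h⟩
        · obtain ⟨r, hr, hkr⟩ := ih.1 h
          exact ⟨r, by simp [hr], hkr⟩
      · rintro ⟨r, hr, hkr⟩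
        rcases List.mem_cons.1 hr with rfl | hr
        · exact hkr.trans ⟨[], c :: [c].intercalate (q :: t), by simp⟩
        · exact (ih.2 ⟨r, hr, hkr⟩).trans ⟨p ++ [c], [], by simp⟩

-- the central bridge: a '.'-free keyword occurs in the name iff it occurs in some part
theorem pv_isIn_split (k s : String) (hk : '.' ∉ k.toList) :
    PySem.Str.isIn k s
      = ((PySem.Str.split? s ".").getD []).any (fun p => PySem.Str.isIn k p) := by
  have hdot : ("." : String).toList = ['.'] := rfl
  have hsplit : PySem.Str.split? s "."
      = some ((s.toList.splitOn '.').map String.ofList) := by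
    simp [PySem.Str.split?, PySem.Chars.split?, hdot, pv_splitOn_single]
  rw [hsplit]
  rw [Bool.eq_iff_iff]
  rw [PySem.Str.isIn_iff_infix]
  have hne : s.toList.splitOn '.' ≠ [] := by
    intro hcon
    exact List.splitOnP_ne_nil (fun x => x == '.') s.toList
      (by simpa [List.splitOn] using hcon)
  have hrebuild : s.toList = ['.'].intercalate (s.toList.splitOn '.') :=
    (List.intercalate_splitOn s.toList '.').symm
  constructor
  · intro h
    rw [hrebuild] at h
    obtain ⟨p, hp, hkp⟩ := (pv_infix_intercalate k.toList '.' hk _ hne).1 h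
    simp only [Option.getD_some, List.any_eq_true]
    exact ⟨String.ofList p, List.mem_map_of_mem hp,
      (PySem.Str.isIn_iff_infix _ _).2 (by simpa using hkp)⟩
  · intro h
    simp only [Option.getD_some, List.any_eq_true] at h
    obtain ⟨p, hp, hkp⟩ := h
    obtain ⟨q, hq, rfl⟩ := List.mem_map.1 hp
    have hkq : k.toList <:+: q := by
      have := (PySem.Str.isIn_iff_infix _ _).1 hkp
      simpa using this
    rw [hrebuild]
    exact (pv_infix_intercalate k.toList '.' hk _ hne).2 ⟨q, hq, hkq⟩

-- fold-minimum facts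
theorem pv_best_le_init (f : String → Nat) (l : List String) (init : Nat) :
    l.foldl (fun b p => if f p < b then f p else b) init ≤ init := by
  induction l generalizing init with
  | nil => simp
  | cons p l ih =>
      simp only [List.foldl_cons]
      refine le_trans (ih _) ?_
      split <;> omega

theorem pv_best_le_mem (f : String → Nat) (p : String) :
    ∀ (l : List String), p ∈ l → ∀ (init : Nat),
      l.foldl (fun b p => if f p < b then f p else b) init ≤ f p := by
  intro l
  induction l with
  | nil => intro hp; cases hp
  | cons q l ih =>
      intro hp init
      simp only [List.foldl_cons]
      rcases List.mem_cons.1 hp with rfl | hp'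
      · refine le_trans (pv_best_le_init f l _) ?_
        split <;> omega
      · exact ih hp' _

theorem pv_best_ge (f : String → Nat) (j : Nat) :
    ∀ (l : List String), (∀ p ∈ l, j ≤ f p) → ∀ (init : Nat), j ≤ init →
      j ≤ l.foldl (fun b p => if f p < b then f p else b) init := by
  intro l
  induction l with
  | nil => intro _ init h0; simpa using h0
  | cons q l ih =>
      intro h init h0
      simp only [List.foldl_cons]
      refine ih (fun p hp => h p (List.mem_cons_of_mem _ hp)) _ ?_
      have := h q (List.mem_cons_self ..)
      split <;> omega

-- first-match rank: upper bound from one occurring keyword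
theorem pv_rankGo_le (part : String) :
    ∀ (ks : List String) (i j : Nat) (k : String),
      ks[j]? = some k → PySem.Str.isIn k part = true →
      pvRankGo part i ks ≤ i + j := by
  intro ks
  induction ks with
  | nil => intro i j k hjk; simp at hjk
  | cons k0 ks ih =>
      intro i j k hjk hk
      cases j with
      | zero =>
          simp only [List.getElem?_cons_zero, Option.some.injEq] at hjk
          subst hjk
          simp only [pvRankGo]
          rw [if_pos hk]
          omega
      | succ j =>
          simp only [List.getElem?_cons_succ] at hjk
          simp only [pvRankGo]
          by_cases h0 : PySem.Str.isIn k0 part = true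
          · rw [if_pos h0]; omega
          · rw [if_neg h0]
            have := ih (i + 1) j k hjk hk
            omega

-- first-match rank: lower bound when the first j keywords are all absent
theorem pv_rankGo_ge (part : String) :
    ∀ (ks : List String) (i j : Nat),
      (∀ k ∈ ks.take (j - i), PySem.Str.isIn k part = false) →
      j ≤ i + ks.length →
      j ≤ pvRankGo part i ks := by
  intro ks
  induction ks with
  | nil =>
      intro i j _ hb
      simp only [List.length_nil] at hb
      simpa [pvRankGo] using hb
  | cons k0 ks ih =>
      intro i j h hb
      simp only [pvRankGo]
      by_cases h0 : PySem.Str.isIn k0 part = true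
      · rw [if_pos h0]
        by_cases hji : i < j
        · exfalso
          have hmem : k0 ∈ (k0 :: ks).take (j - i) := by
            cases e : j - i with
            | zero => omega
            | succ m => simp
          have := h k0 hmem
          rw [this] at h0
          exact Bool.false_ne_true h0
        · omega
      · rw [if_neg h0]
        apply ih (i + 1) j
        · intro k hkm
          apply h
          cases e : j - i with
          | zero =>
              have e2 : j - (i + 1) = 0 := by omega
              rw [e2] at hkm
              simp at hkm
          | succ m =>
              have e2 : j - (i + 1) = m := by omega
              rw [e2] at hkm
              simp only [List.take_succ_cons, List.mem_cons]
              exact Or.inr hkm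
        · simp only [List.length_cons] at hb
          omega

theorem pvBest_le_mem (parts : List String) (p : String) (hp : p ∈ parts) :
    pvBest parts ≤ pvRank p := by
  unfold pvBest
  exact pv_best_le_mem pvRank p parts hp pvPriority.length

theorem pvBest_ge (parts : List String) (j : Nat)
    (h : ∀ p ∈ parts, j ≤ pvRank p) (hj : j ≤ pvPriority.length) :
    j ≤ pvBest parts := by
  unfold pvBest
  exact pv_best_ge pvRank j parts h pvPriority.length hj

theorem pvBest_le_len (parts : List String) : pvBest parts ≤ pvPriority.length := by
  unfold pvBest
  exact pv_best_le_init pvRank parts pvPriority.length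

theorem pvRank_le (p : String) (j : Nat) (k : String)
    (hjk : pvPriority[j]? = some k) (hk : PySem.Str.isIn k p = true) :
    pvRank p ≤ j := by
  unfold pvRank
  simpa using pv_rankGo_le p pvPriority 0 j k hjk hk

theorem pvRank_ge (p : String) (j : Nat)
    (h : ∀ k ∈ pvPriority.take j, PySem.Str.isIn k p = false)
    (hj : j ≤ pvPriority.length) :
    j ≤ pvRank p := by
  unfold pvRank
  exact pv_rankGo_ge p pvPriority 0 j (by simpa using h) (by simpa using hj)

-- ===== VERDICT (by name: the statement is the Claim_ definition above) =====
theorem get_component_name_spec : Claim_equal_get_component_name := by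
  intro s _
  unfold Spec_get_component_name get_component_name get_component_name_alt
  have hfg : ∀ p : String, PySem.Str.strIsdigit p = true →
      (PySem.Str.isIn "encoder" p || PySem.Str.isIn "decoder" p) = false := fun p hp => by
    rw [pv_digit_no_e p "encoder" hp (by decide), pv_digit_no_e p "decoder" hp (by decide)]
    rfl
  simp only [pv_fold_fst, pv_fold_snd _ _ hfg, Option.or_none,
    pv_isIn_split "augmentation_pipeline" s (by decide),
    pv_isIn_split "autoencoder" s (by decide),
    pv_isIn_split "cross_aug_learning" s (by decide),
    pv_isIn_split "fc_list" s (by decide),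
    pv_isIn_split "feat_drop" s (by decide),
    pv_isIn_split "mp_encoder" s (by decide),
    pv_isIn_split "mp" s (by decide),
    pv_isIn_split "sc_encoder" s (by decide),
    pv_isIn_split "sc" s (by decide),
    pv_isIn_split "contrast" s (by decide),
    pv_isIn_split "att" s (by decide),
    pv_isIn_split "attention" s (by decide),
    pv_isIn_split "expert" s (by decide)]
  set parts := (PySem.Str.split? s ".").getD [] with hparts
  have hP : pvPriority.length = 10 := rfl
  by_cases hlen : parts.length < 2
  · have h2 : ¬ 2 ≤ parts.length := by omega
    simp only [hlen, h2, if_true, if_false]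
  · have h2 : 2 ≤ parts.length := by omega
    simp only [hlen, h2, if_true, if_false]
    by_cases haug : parts.any (fun p => PySem.Str.isIn "augmentation_pipeline" p) = true
    · simp only [haug, if_true]
      by_cases hauto : parts.any (fun p => PySem.Str.isIn "autoencoder" p) = true
      · simp only [hauto, if_true]
        cases hx : parts.reverse.find? (fun p => PySem.Str.strIsdigit p) with
        | none => simp
        | some idx => simp [hx]
      · simp only [hauto, Bool.false_eq_true, if_false]
    · simp only [haug, Bool.false_eq_true, if_false]
      by_cases hcross : parts.any (fun p => PySem.Str.isIn "cross_aug_learning" p) = true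
      · simp only [hcross, if_true]
      · simp only [hcross, Bool.false_eq_true, if_false]
        -- the keyword cascade vs the part-wise minimum rank
        by_cases g0 : (parts.any (fun p => PySem.Str.isIn "fc_list" p)
            || parts.any (fun p => PySem.Str.isIn "feat_drop" p)) = true
        · rw [if_pos g0]
          have g0' : (∃ p ∈ parts, PySem.Str.isIn "fc_list" p = true)
              ∨ (∃ p ∈ parts, PySem.Str.isIn "feat_drop" p = true) := by simpa using g0
          have hub : pvBest parts ≤ 1 := by
            rcases g0' with ⟨p, hp, hk⟩ | ⟨p, hp, hk⟩
            · have ha := pvBest_le_mem parts p hp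
              have hb := pvRank_le p 0 "fc_list" (by decide) hk
              omega
            · have ha := pvBest_le_mem parts p hp
              have hb := pvRank_le p 1 "feat_drop" (by decide) hk
              omega
          rw [if_pos (by omega)]
          rcases (show pvBest parts = 0 ∨ pvBest parts = 1 by omega) with h | h <;>
            rw [h] <;> decide
        · rw [if_neg g0]
          have hn0 : (∀ p ∈ parts, PySem.Str.isIn "fc_list" p = false)
              ∧ (∀ p ∈ parts, PySem.Str.isIn "feat_drop" p = false) := by simpa using g0
          by_cases g1 : (parts.any (fun p => PySem.Str.isIn "mp_encoder" p)
              || parts.any (fun p => PySem.Str.isIn "mp" p)) = true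
          · rw [if_pos g1]
            have g1' : (∃ p ∈ parts, PySem.Str.isIn "mp_encoder" p = true)
                ∨ (∃ p ∈ parts, PySem.Str.isIn "mp" p = true) := by simpa using g1
            have hub : pvBest parts ≤ 3 := by
              rcases g1' with ⟨p, hp, hk⟩ | ⟨p, hp, hk⟩
              · have ha := pvBest_le_mem parts p hp
                have hb := pvRank_le p 2 "mp_encoder" (by decide) hk
                omega
              · have ha := pvBest_le_mem parts p hp
                have hb := pvRank_le p 3 "mp" (by decide) hk
                omega
            have hlb : 2 ≤ pvBest parts :=
              pvBest_ge parts 2 (fun p hp => pvRank_ge p 2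
                (by
                  intro kk hkm
                  simp only [pvPriority, List.take_succ_cons, List.take_zero, List.mem_cons,
                    List.not_mem_nil, or_false] at hkm
                  rcases hkm with rfl | rfl
                  · exact hn0.1 p hp
                  · exact hn0.2 p hp
                  ) (by omega)) (by omega)
            rw [if_pos (by omega)]
            rcases (show pvBest parts = 2 ∨ pvBest parts = 3 by omega) with h | h <;>
              rw [h] <;> decide
          · rw [if_neg g1]
            have hn1 : (∀ p ∈ parts, PySem.Str.isIn "mp_encoder" p = false)
                ∧ (∀ p ∈ parts, PySem.Str.isIn "mp" p = false) := by simpa using g1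
            by_cases g2 : (parts.any (fun p => PySem.Str.isIn "sc_encoder" p)
                || parts.any (fun p => PySem.Str.isIn "sc" p)) = true
            · rw [if_pos g2]
              have g2' : (∃ p ∈ parts, PySem.Str.isIn "sc_encoder" p = true)
                  ∨ (∃ p ∈ parts, PySem.Str.isIn "sc" p = true) := by simpa using g2
              have hub : pvBest parts ≤ 5 := by
                rcases g2' with ⟨p, hp, hk⟩ | ⟨p, hp, hk⟩
                · have ha := pvBest_le_mem parts p hp
                  have hb := pvRank_le p 4 "sc_encoder" (by decide) hk
                  omega
                · have ha := pvBest_le_mem parts p hp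
                  have hb := pvRank_le p 5 "sc" (by decide) hk
                  omega
              have hlb : 4 ≤ pvBest parts :=
                pvBest_ge parts 4 (fun p hp => pvRank_ge p 4
                  (by
                    intro kk hkm
                    simp only [pvPriority, List.take_succ_cons, List.take_zero, List.mem_cons,
                      List.not_mem_nil, or_false] at hkm
                    rcases hkm with rfl | rfl | rfl | rfl
                    · exact hn0.1 p hp
                    · exact hn0.2 p hp
                    · exact hn1.1 p hp
                    · exact hn1.2 p hp
                    )
                  (by omega)) (by omega)
              rw [if_pos (by omega)]
              rcases (show pvBest parts = 4 ∨ pvBest parts = 5 by omega) with h | h <;>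
                rw [h] <;> decide
            · rw [if_neg g2]
              have hn2 : (∀ p ∈ parts, PySem.Str.isIn "sc_encoder" p = false)
                  ∧ (∀ p ∈ parts, PySem.Str.isIn "sc" p = false) := by simpa using g2
              by_cases g3 : parts.any (fun p => PySem.Str.isIn "contrast" p) = true
              · rw [if_pos g3]
                have g3' : ∃ p ∈ parts, PySem.Str.isIn "contrast" p = true := by
                  simpa using g3
                have hub : pvBest parts ≤ 6 := by
                  obtain ⟨p, hp, hk⟩ := g3'
                  have ha := pvBest_le_mem parts p hp
                  have hb := pvRank_le p 6 "contrast" (by decide) hk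
                  omega
                have hlb : 6 ≤ pvBest parts :=
                  pvBest_ge parts 6 (fun p hp => pvRank_ge p 6
                    (by
                      intro kk hkm
                      simp only [pvPriority, List.take_succ_cons, List.take_zero, List.mem_cons,
                        List.not_mem_nil, or_false] at hkm
                      rcases hkm with rfl | rfl | rfl | rfl | rfl | rfl
                      · exact hn0.1 p hp
                      · exact hn0.2 p hp
                      · exact hn1.1 p hp
                      · exact hn1.2 p hp
                      · exact hn2.1 p hp
                      · exact hn2.2 p hp
                      ) (by omega)) (by omega)
                rw [if_pos (by omega)]
                rw [show pvBest parts = 6 by omega]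
                decide
              · rw [if_neg g3]
                have hn3 : ∀ p ∈ parts, PySem.Str.isIn "contrast" p = false := by
                  simpa using g3
                by_cases g4 : (parts.any (fun p => PySem.Str.isIn "att" p)
                    || parts.any (fun p => PySem.Str.isIn "attention" p)) = true
                · rw [if_pos g4]
                  have g4' : (∃ p ∈ parts, PySem.Str.isIn "att" p = true)
                      ∨ (∃ p ∈ parts, PySem.Str.isIn "attention" p = true) := by
                    simpa using g4
                  have hub : pvBest parts ≤ 8 := by
                    rcases g4' with ⟨p, hp, hk⟩ | ⟨p, hp, hk⟩
                    · have ha := pvBest_le_mem parts p hp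
                      have hb := pvRank_le p 7 "att" (by decide) hk
                      omega
                    · have ha := pvBest_le_mem parts p hp
                      have hb := pvRank_le p 8 "attention" (by decide) hk
                      omega
                  have hlb : 7 ≤ pvBest parts :=
                    pvBest_ge parts 7 (fun p hp => pvRank_ge p 7
                      (by
                        intro kk hkm
                        simp only [pvPriority, List.take_succ_cons, List.take_zero, List.mem_cons,
                          List.not_mem_nil, or_false] at hkm
                        rcases hkm with rfl | rfl | rfl | rfl | rfl | rfl | rfl
                        · exact hn0.1 p hp
                        · exact hn0.2 p hp
                        · exact hn1.1 p hp
                        · exact hn1.2 p hp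
                        · exact hn2.1 p hp
                        · exact hn2.2 p hp
                        · exact hn3 p hp
                        ) (by omega))
                      (by omega)
                  rw [if_pos (by omega)]
                  rcases (show pvBest parts = 7 ∨ pvBest parts = 8 by omega) with h | h <;>
                    rw [h] <;> decide
                · rw [if_neg g4]
                  have hn4 : (∀ p ∈ parts, PySem.Str.isIn "att" p = false)
                      ∧ (∀ p ∈ parts, PySem.Str.isIn "attention" p = false) := by
                    simpa using g4
                  by_cases g5 : parts.any (fun p => PySem.Str.isIn "expert" p) = true
                  · rw [if_pos g5]
                    have g5' : ∃ p ∈ parts, PySem.Str.isIn "expert" p = true := by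
                      simpa using g5
                    have hub : pvBest parts ≤ 9 := by
                      obtain ⟨p, hp, hk⟩ := g5'
                      have ha := pvBest_le_mem parts p hp
                      have hb := pvRank_le p 9 "expert" (by decide) hk
                      omega
                    have hlb : 9 ≤ pvBest parts :=
                      pvBest_ge parts 9 (fun p hp => pvRank_ge p 9
                        (by
                          intro kk hkm
                          simp only [pvPriority, List.take_succ_cons, List.take_zero, List.mem_cons,
                            List.not_mem_nil, or_false] at hkm
                          rcases hkm with rfl | rfl | rfl | rfl | rfl | rfl | rfl | rfl | rfl
                          · exact hn0.1 p hp
                          · exact hn0.2 p hp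
                          · exact hn1.1 p hp
                          · exact hn1.2 p hp
                          · exact hn2.1 p hp
                          · exact hn2.2 p hp
                          · exact hn3 p hp
                          · exact hn4.1 p hp
                          · exact hn4.2 p hp
                          ) (by omega)) (by omega)
                    rw [if_pos (by omega)]
                    rw [show pvBest parts = 9 by omega]
                    decide
                  · rw [if_neg g5]
                    have hn5 : ∀ p ∈ parts, PySem.Str.isIn "expert" p = false := by
                      simpa using g5
                    have hub : pvBest parts ≤ 10 := by
                      have := pvBest_le_len parts
                      omega
                    have hlb : 10 ≤ pvBest parts :=
                      pvBest_ge parts 10 (fun p hp => pvRank_ge p 10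
                        (by
                          intro kk hkm
                          simp only [pvPriority, List.take_succ_cons, List.take_zero, List.mem_cons,
                            List.not_mem_nil, or_false] at hkm
                          rcases hkm with rfl | rfl | rfl | rfl | rfl | rfl | rfl | rfl | rfl | rfl
                          · exact hn0.1 p hp
                          · exact hn0.2 p hp
                          · exact hn1.1 p hp
                          · exact hn1.2 p hp
                          · exact hn2.1 p hp
                          · exact hn2.2 p hp
                          · exact hn3 p hp
                          · exact hn4.1 p hp
                          · exact hn4.2 p hp
                          · exact hn5 p hp
                          ) (by omega)) (by omega)
                    rw [if_neg (by omega)]
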